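-- pv_equiv track=rewrite | github.com/acelynnzhang/Advent2023 | day13.py | check
-- ===== SOURCE A (Python) =====
-- def check(str, int):
--     move = min(int-1, len(str)-int)
--     l = int -1
--     r = int
--     while move > 0:
--         if str[l] != str[r]:
--             return False
--         move-=1
--         l-= 1
--         r+=1
--     return True
-- ===== SOURCE B (Python) =====
-- def check(str, int):
--     move = min(int - 1, len(str) - int)
--     if move <= 0:
--         return True
--     left = str[int - move:int][::-1]
--     right = str[int:int + move]
--     return left == right
-- ===== Notes on version B (the rewrite author's own statement) =====
-- stated objective: simpler
-- what changed: Replaces A's outward two-pointer while-loop with a single slice-reverse-and-compare of the mirrored halves.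
import Mathlib
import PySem

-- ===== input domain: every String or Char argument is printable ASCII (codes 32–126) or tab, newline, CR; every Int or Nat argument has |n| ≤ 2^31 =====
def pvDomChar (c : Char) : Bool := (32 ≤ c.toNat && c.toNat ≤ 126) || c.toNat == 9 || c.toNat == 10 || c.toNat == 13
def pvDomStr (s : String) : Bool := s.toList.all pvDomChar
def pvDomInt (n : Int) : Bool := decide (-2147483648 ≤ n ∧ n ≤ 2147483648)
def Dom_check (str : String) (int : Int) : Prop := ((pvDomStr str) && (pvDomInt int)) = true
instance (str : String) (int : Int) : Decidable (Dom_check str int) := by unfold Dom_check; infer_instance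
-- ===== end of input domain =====

-- B replaces A's outward two-pointer while-loop with a slice-reverse-and-compare (simpler).

-- ===== PORT A =====
-- the while loop: move/l/r are the three mutable variables, in the same order
def checkLoop (s : List Char) (move l r : Int) : Bool :=
  if h : move > 0 then
    match PySem.List.pyGet? s l, PySem.List.pyGet? s r with
    | some cl, some cr =>
        if cl ≠ cr then false else checkLoop s (move - 1) (l - 1) (r + 1)
    | _, _ => false   -- IndexError; unreachable for A's actual call (indices stay in range)
  else true
termination_by move.toNat
decreasing_by omega

def check (str : String) (int : Int) : Bool :=
  let move := min (int - 1) (PySem.Str.len str - int)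
  checkLoop str.toList move (int - 1) int

-- ===== PORT B =====
def check_alt (str : String) (int : Int) : Bool :=
  let s := str.toList
  let move := min (int - 1) (PySem.Str.len str - int)
  if move ≤ 0 then true
  else
    -- str[int-move:int][::-1]  ([::-1] = reverse, PySem.List.slice?_none_none_neg_one)
    let left := (PySem.List.slice s (some (int - move)) (some int)).reverse
    let right := PySem.List.slice s (some int) (some (int + move))
    left == right

-- ===== PRECONDITION & SPEC =====
def Spec_check (str : String) (int : Int) (out : Bool) : Prop := out = check_alt str int
instance (str : String) (int : Int) (out : Bool) : Decidable (Spec_check str int out) := by unfold Spec_check; infer_instance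

-- ===== CLAIM (what is proved, stated in full; the proofs are below) =====
def Claim_equal_check : Prop := ∀ (str : String) (int : Int), Dom_check str int → Spec_check str int (check str int)

-- ===== LEMMAS AND PROOFS =====

-- loop invariant: the loop compares s[l-j] with s[r+j] for j < k, which is exactly
-- the reversed left slice against the right slice
lemma checkLoop_eq_slices (k : Nat) : ∀ (s : List Char) (l r : Int),
    (k : Int) ≤ l + 1 → l < r → r + (k : Int) ≤ s.length →
    checkLoop s (k : Int) l r =
      (((s.drop (l + 1 - k).toNat).take k).reverse == (s.drop r.toNat).take k) := by
  induction k with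
  | zero =>
    intro s l r _ _ _
    rw [checkLoop]
    simp
  | succ k ih =>
    intro s l r hk hlr hlen
    have hl0 : 0 ≤ l := by omega
    have hr0 : 0 ≤ r := by omega
    have hlN : l < (s.length : Int) := by omega
    have hrN : r < (s.length : Int) := by omega
    have hlN' : l.toNat < s.length := by omega
    have hrN' : r.toNat < s.length := by omega
    rw [checkLoop]
    rw [dif_pos (show ((k + 1 : Nat) : Int) > 0 by push_cast; omega)]
    rw [PySem.List.pyGet?_eq_some_getElem s hl0 hlN,
        PySem.List.pyGet?_eq_some_getElem s hr0 hrN]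
    have hdropidx : (l + 1 - ((k : Int) + 1)).toNat = (l - k).toNat := by omega
    -- left side of B at k+1: take (k+1) = take k ++ [s[l]]
    have hm : (l - (k : Int)).toNat + k = l.toNat := by omega
    have hmlen : (l - (k : Int)).toNat + k < s.length := by omega
    have hleft : (s.drop (l - (k : Int)).toNat).take (k + 1)
        = (s.drop (l - (k : Int)).toNat).take k ++ [s[l.toNat]] := by
      rw [List.take_add_one]
      congr 1
      rw [List.getElem?_drop]
      have h9 : (l - (k : Int)).toNat + k = l.toNat := by omega
      rw [h9, List.getElem?_eq_getElem hlN']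
      rfl
    have hright : (s.drop r.toNat).take (k + 1)
        = s[r.toNat] :: ((s.drop (r + 1).toNat).take k) := by
      have h8 : (r + 1).toNat = r.toNat + 1 := by omega
      rw [h8, List.drop_eq_getElem_cons hrN']
      rfl
    by_cases hc : s[l.toNat] = s[r.toNat]
    · simp only [hc, ne_eq, not_true_eq_false, if_false]
      have := ih s (l - 1) (r + 1) (by omega) (by omega) (by omega)
      rw [show ((k + 1 : Nat) : Int) = (k : Int) + 1 by push_cast; ring] at *
      rw [show ((k : Int) + 1 - 1) = (k : Int) from by ring, this]
      rw [show (l + 1 - ((k : Int) + 1)).toNat = (l - (k : Int)).toNat from by omega,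
          show (l - 1 + 1 - (k : Int)).toNat = (l - (k : Int)).toNat from by omega]
      rw [hleft, hright, List.reverse_append]
      simp [hc, List.cons_beq_cons]
    · simp only [ne_eq, hc, not_false_eq_true, if_true]
      rw [show (l + 1 - ((k + 1 : Nat) : Int)).toNat = (l - (k : Int)).toNat from by push_cast; omega]
      rw [hleft, hright, List.reverse_append]
      simp [hc, List.cons_beq_cons]

-- ===== VERDICT (by name: the statement is the Claim_ definition above) =====
theorem check_spec : Claim_equal_check := by
  intro str int _
  unfold Spec_check check check_alt
  set s := str.toList with hs
  have hlen : PySem.Str.len str = (s.length : Int) := by simp [PySem.Str.len_eq, hs]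
  set move := min (int - 1) (PySem.Str.len str - int) with hmove
  by_cases h0 : move ≤ 0
  · rw [checkLoop]
    simp [h0, not_lt.mpr h0]
  · rw [not_le] at h0
    have hm1 : move ≤ int - 1 := min_le_left _ _
    have hm2 : move ≤ (s.length : Int) - int := by
      have := min_le_right (int - 1) (PySem.Str.len str - int); omega
    have hk : move = ((move.toNat : Nat) : Int) := by omega
    rw [if_neg (by omega)]
    rw [hk, checkLoop_eq_slices move.toNat s (int - 1) int (by omega) (by omega) (by omega)]
    show _ = ((PySem.List.slice s (some (int - ((move.toNat : Nat) : Int))) (some int)).reverse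
        == PySem.List.slice s (some int) (some (int + ((move.toNat : Nat) : Int))))
    rw [← hk]
    rw [PySem.List.slice_toNat s (a := int - move) (b := int) (by omega) (by omega),
        PySem.List.slice_toNat s (a := int) (b := int + move) (by omega) (by omega)]
    rw [show (int - 1 + 1 - move).toNat = (int - move).toNat from by omega,
        show int.toNat - (int - move).toNat = move.toNat from by omega,
        show (int + move).toNat - int.toNat = move.toNat from by omega]
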